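-- pv_equiv track=rewrite | github.com/nkawarai/keibaTools | 点数計算/BakenCombinationCalculator.py | calculate_umaren_formation_points
-- ===== SOURCE A (Python) =====
-- def calculate_umaren_formation_points(line1, line2):
--     """
--     馬連フォーメーションの買い目点数を計算する
--     :param line1: 軸1の馬番号リスト
--     :param line2: 軸2の馬番号リスト
--     :return: 買い目の点数
--     """
--     combinations = []
--     for horse1 in line1:
--         for horse2 in line2:
--             if horse1 == horse2:  # 軸1と軸2で同じ馬を避ける
--                 continue
--             combinations.append(sorted([horse1, horse2]))
--
--     # 重複を削除
--     distinct_array = list(set(tuple(sublist) for sublist in combinations))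
--     return len(distinct_array)
-- ===== SOURCE B (Python) =====
-- def calculate_umaren_formation_points(line1, line2):
--     s1 = set(line1)
--     s2 = set(line2)
--     i = len(s1 & s2)
--     return len(s1) * len(s2) - i - i * (i - 1) // 2
-- ===== Notes on version B (the rewrite author's own statement) =====
-- stated objective: faster
-- what changed: Replaces the nested-loop enumeration and dedup of all sorted pairs by a closed-form count over the two distinct sets: |S1|*|S2| - |S1∩S2| - C(|S1∩S2|,2).
import Mathlib
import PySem

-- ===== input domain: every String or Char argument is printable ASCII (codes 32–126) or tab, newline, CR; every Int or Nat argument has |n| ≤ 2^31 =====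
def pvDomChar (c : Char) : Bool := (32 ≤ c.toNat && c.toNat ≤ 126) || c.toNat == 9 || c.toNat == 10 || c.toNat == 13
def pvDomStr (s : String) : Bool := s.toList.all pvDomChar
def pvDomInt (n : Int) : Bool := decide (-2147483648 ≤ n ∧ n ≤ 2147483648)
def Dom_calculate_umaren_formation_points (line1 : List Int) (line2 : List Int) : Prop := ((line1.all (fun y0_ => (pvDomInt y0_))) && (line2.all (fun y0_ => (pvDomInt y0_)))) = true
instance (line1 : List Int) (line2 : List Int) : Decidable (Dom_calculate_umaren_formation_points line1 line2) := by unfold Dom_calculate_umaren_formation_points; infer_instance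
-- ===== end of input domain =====

-- B replaces A's O(n·m) enumeration-and-dedup of sorted pairs by the closed-form set count
-- |set1|·|set2| − |set1∩set2| − C(|set1∩set2|, 2); measurably faster on large inputs.

-- ===== PORT A =====
-- Python's tuple(sublist) only makes the 2-element list hashable; it is ported as the
-- 2-element list itself put into a PySem.Set (an injective repackaging, so len is exact).
def calculate_umaren_formation_points (line1 : List Int) (line2 : List Int) : Int :=
  let combinations : List (List Int) :=
    line1.foldl (fun acc h1 =>
      line2.foldl (fun acc2 h2 =>
        if h1 == h2 then acc2
        else acc2 ++ [PySem.List.sorted [h1, h2] (fun x => x)]) acc) []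
  let distinct_array : PySem.Set (List Int) := PySem.Set.ofList combinations
  PySem.List.len distinct_array

-- ===== PORT B =====
def calculate_umaren_formation_points_alt (line1 : List Int) (line2 : List Int) : Int :=
  let s1 : PySem.Set Int := PySem.Set.ofList line1
  let s2 : PySem.Set Int := PySem.Set.ofList line2
  let i : Int := PySem.Set.len (PySem.Set.inter s1 s2)
  PySem.Set.len s1 * PySem.Set.len s2 - i - PySem.Int.floordiv (i * (i - 1)) 2

-- ===== PRECONDITION & SPEC =====
def Spec_calculate_umaren_formation_points (line1 : List Int) (line2 : List Int) (out : Int) : Prop := out = calculate_umaren_formation_points_alt line1 line2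
instance (line1 : List Int) (line2 : List Int) (out : Int) : Decidable (Spec_calculate_umaren_formation_points line1 line2 out) := by unfold Spec_calculate_umaren_formation_points; infer_instance

-- ===== CLAIM (what is proved, stated in full; the proofs are below) =====
def Claim_equal_calculate_umaren_formation_points : Prop := ∀ (line1 : List Int) (line2 : List Int), Dom_calculate_umaren_formation_points line1 line2 → Spec_calculate_umaren_formation_points line1 line2 (calculate_umaren_formation_points line1 line2)

-- ===== LEMMAS AND PROOFS =====

-- sorting a 2-element list
theorem pv_sorted_pair (a b : Int) :
    PySem.List.sorted [a, b] (fun x => x) = [min a b, max a b] := by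
  rcases le_total a b with h | h
  · rw [PySem.List.sorted_id_eq_of_perm_of_pairwise [a, b] [a, b] (List.Perm.refl _)
      (by simp [h])]
    simp [min_eq_left h, max_eq_right h]
  · rw [PySem.List.sorted_id_eq_of_perm_of_pairwise [a, b] [b, a]
      (List.Perm.swap _ _ _) (by simp [h])]
    simp [min_eq_right h, max_eq_left h]

-- the double loop of A, in closed form
theorem pv_combs_eq (line1 line2 : List Int) :
    line1.foldl (fun acc h1 =>
      line2.foldl (fun acc2 h2 =>
        if h1 == h2 then acc2
        else acc2 ++ [PySem.List.sorted [h1, h2] (fun x => x)]) acc) []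
    = line1.flatMap (fun a =>
        (line2.filter (fun b => a != b)).map (fun b => [min a b, max a b])) := by
  have hinner : ∀ (h1 : Int) (acc : List (List Int)),
      line2.foldl (fun acc2 h2 =>
        if h1 == h2 then acc2
        else acc2 ++ [PySem.List.sorted [h1, h2] (fun x => x)]) acc
      = acc ++ (line2.filter (fun b => h1 != b)).map (fun b => [min h1 b, max h1 b]) := by
    intro h1 acc
    have hfun : (fun acc2 h2 =>
        if h1 == h2 then acc2
        else acc2 ++ [PySem.List.sorted [h1, h2] (fun x => x)])
        = (fun (acc2 : List (List Int)) (h2 : Int) =>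
            if (h1 != h2) = true then acc2 ++ [[min h1 h2, max h1 h2]] else acc2) := by
      funext acc2 h2
      by_cases h : h1 = h2 <;> simp [h, pv_sorted_pair]
    rw [hfun, PySem.List.foldl_append_if]
  have houter : (fun (acc : List (List Int)) (h1 : Int) =>
      line2.foldl (fun acc2 h2 =>
        if h1 == h2 then acc2
        else acc2 ++ [PySem.List.sorted [h1, h2] (fun x => x)]) acc)
      = (fun acc h1 => acc ++
          (line2.filter (fun b => h1 != b)).map (fun b => [min h1 b, max h1 b])) := by
    funext acc h1; exact hinner h1 acc
  rw [houter, PySem.List.foldl_append_eq_flatMap]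
  simp

-- membership in A's combination list
theorem pv_mem_combs (line1 line2 : List Int) (x : List Int) :
    x ∈ line1.flatMap (fun a =>
        (line2.filter (fun b => a != b)).map (fun b => [min a b, max a b]))
    ↔ ∃ a ∈ line1, ∃ b ∈ line2, a ≠ b ∧ x = [min a b, max a b] := by
  simp only [List.mem_flatMap, List.mem_map, List.mem_filter, bne_iff_ne]
  constructor
  · rintro ⟨a, ha, b, ⟨hb, hne⟩, hx⟩; exact ⟨a, ha, b, hb, hne, hx.symm⟩
  · rintro ⟨a, ha, b, hb, hne, hx⟩; exact ⟨a, ha, b, ⟨hb, hne⟩, hx.symm⟩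

-- a PySem set's length is the card of the underlying list's toFinset
theorem pv_len_ofList (xs : List Int) :
    (PySem.Set.ofList xs).length = xs.toFinset.card := by
  rw [← List.toFinset_card_of_nodup (PySem.Set.nodup_ofList xs)]
  congr 1
  ext y
  simp [PySem.Set.mem_ofList]

theorem pv_len_ofList_lists (xs : List (List Int)) :
    (PySem.Set.ofList xs).length = xs.toFinset.card := by
  rw [← List.toFinset_card_of_nodup (PySem.Set.nodup_ofList xs)]
  congr 1
  ext y
  simp [PySem.Set.mem_ofList]

theorem pv_len_inter (xs ys : List Int) :
    (PySem.Set.inter (PySem.Set.ofList xs) (PySem.Set.ofList ys)).length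
      = (xs.toFinset ∩ ys.toFinset).card := by
  rw [← List.toFinset_card_of_nodup
    (PySem.Set.nodup_inter _ _ (PySem.Set.nodup_ofList xs))]
  congr 1
  ext y
  simp [PySem.Set.mem_inter, PySem.Set.mem_ofList]

-- abbreviations used only by the proofs
def pvNE (s t : Finset Int) : Finset (Int × Int) := (s ×ˢ t).filter (fun p => p.1 ≠ p.2)
def pvLT (s t : Finset Int) : Finset (Int × Int) := (s ×ˢ t).filter (fun p => p.1 < p.2)
def pvGP (p : Int × Int) : Int × Int := (min p.1 p.2, max p.1 p.2)

theorem pv_image_eq (s t : Finset Int) :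
    (pvNE s t).image pvGP = pvLT s t ∪ pvLT t s := by
  ext ⟨x, y⟩
  simp only [pvNE, pvLT, pvGP, Finset.mem_image, Finset.mem_union, Finset.mem_filter,
    Finset.mem_product]
  constructor
  · rintro ⟨⟨a, b⟩, ⟨⟨ha, hb⟩, hne⟩, heq⟩
    simp only [Prod.mk.injEq] at heq
    obtain ⟨h1, h2⟩ := heq
    subst h1; subst h2
    rcases lt_or_gt_of_ne hne with h | h
    · left; simp [min_eq_left h.le, max_eq_right h.le, ha, hb, h]
    · right; simp [min_eq_right h.le, max_eq_left h.le, ha, hb, h]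
  · rintro (⟨⟨hx, hy⟩, hlt⟩ | ⟨⟨hx, hy⟩, hlt⟩)
    · exact ⟨(x, y), ⟨⟨hx, hy⟩, ne_of_lt hlt⟩,
        by simp [min_eq_left hlt.le, max_eq_right hlt.le]⟩
    · exact ⟨(y, x), ⟨⟨hy, hx⟩, ne_of_gt hlt⟩,
        by simp [min_eq_right hlt.le, max_eq_left hlt.le]⟩

theorem pv_card_lt_swap (s t : Finset Int) :
    (pvLT t s).card = ((s ×ˢ t).filter (fun p => p.2 < p.1)).card := by
  apply Finset.card_bij' (fun p _ => Prod.swap p) (fun p _ => Prod.swap p)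
  · rintro ⟨a, b⟩ h
    simp only [pvLT, Finset.mem_filter, Finset.mem_product] at h ⊢
    exact ⟨⟨h.1.2, h.1.1⟩, h.2⟩
  · rintro ⟨a, b⟩ h
    simp only [pvLT, Finset.mem_filter, Finset.mem_product] at h ⊢
    exact ⟨⟨h.1.2, h.1.1⟩, h.2⟩
  · rintro ⟨a, b⟩ _; rfl
  · rintro ⟨a, b⟩ _; rfl

theorem pv_card_diag (s t : Finset Int) :
    ((s ×ˢ t).filter (fun p => p.1 = p.2)).card = (s ∩ t).card := by
  have : (s ×ˢ t).filter (fun p => p.1 = p.2) = (s ∩ t).image (fun x => (x, x)) := by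
    ext ⟨a, b⟩
    simp only [Finset.mem_filter, Finset.mem_product, Finset.mem_image, Finset.mem_inter,
      Prod.mk.injEq]
    constructor
    · rintro ⟨⟨ha, hb⟩, h⟩; subst h; exact ⟨a, ⟨ha, hb⟩, rfl, rfl⟩
    · rintro ⟨c, ⟨hc1, hc2⟩, h1, h2⟩; subst h1; subst h2; exact ⟨⟨hc1, hc2⟩, rfl⟩
  rw [this, Finset.card_image_of_injective _ (fun a b h => (Prod.mk.injEq _ _ _ _).mp h |>.1)]

theorem pv_split (s t : Finset Int) :
    (pvLT s t).card + ((s ×ˢ t).filter (fun p => p.2 < p.1)).card + (s ∩ t).card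
      = s.card * t.card := by
  have h1 := Finset.card_filter_add_card_filter_not (s := s ×ˢ t) (p := fun p => p.1 = p.2)
  have h2 := Finset.card_filter_add_card_filter_not
    (s := (s ×ˢ t).filter (fun p => ¬ p.1 = p.2)) (p := fun p => p.1 < p.2)
  rw [Finset.filter_filter, Finset.filter_filter] at h2
  have e1 : (s ×ˢ t).filter (fun p => ¬p.1 = p.2 ∧ p.1 < p.2) = pvLT s t := by
    unfold pvLT; apply Finset.filter_congr; rintro ⟨a, b⟩ _
    constructor
    · rintro ⟨_, h⟩; exact h
    · intro h; exact ⟨ne_of_lt h, h⟩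
  have e2 : (s ×ˢ t).filter (fun p => ¬p.1 = p.2 ∧ ¬p.1 < p.2)
      = (s ×ˢ t).filter (fun p => p.2 < p.1) := by
    apply Finset.filter_congr; rintro ⟨a, b⟩ _
    constructor
    · rintro ⟨hne, hnl⟩; omega
    · intro h; omega
  rw [e1, e2] at h2
  rw [pv_card_diag] at h1
  rw [← Finset.card_product s t, ← h1, ← h2]
  ring

-- main counting identity
theorem pv_count (s t : Finset Int) :
    ((pvNE s t).image pvGP).card + (pvLT (s ∩ t) (s ∩ t)).card + (s ∩ t).card
      = s.card * t.card := by
  have hinter : pvLT s t ∩ pvLT t s = pvLT (s ∩ t) (s ∩ t) := by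
    ext ⟨a, b⟩
    simp only [pvLT, Finset.mem_inter, Finset.mem_filter, Finset.mem_product]
    tauto
  have hu := Finset.card_union_add_card_inter (pvLT s t) (pvLT t s)
  rw [hinter] at hu
  rw [pv_image_eq]
  have := pv_split s t
  rw [← pv_card_lt_swap s t] at this
  omega

-- the two-list pairs-into-lists packaging is injective, so card is preserved
theorem pv_card_listify (P : Finset (Int × Int)) :
    (P.image (fun p => [min p.1 p.2, max p.1 p.2])).card = (P.image pvGP).card := by
  have : P.image (fun p => [min p.1 p.2, max p.1 p.2])
      = (P.image pvGP).image (fun q => [q.1, q.2]) := by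
    rw [Finset.image_image]; rfl
  rw [this, Finset.card_image_of_injective]
  rintro ⟨a, b⟩ ⟨c, d⟩ h
  simp only [List.cons.injEq, and_true] at h
  exact Prod.ext h.1 h.2

-- A's distinct set, as a Finset image
theorem pv_toFinset_combs (line1 line2 : List Int) :
    (line1.flatMap (fun a =>
        (line2.filter (fun b => a != b)).map (fun b => [min a b, max a b]))).toFinset
    = (pvNE line1.toFinset line2.toFinset).image (fun p => [min p.1 p.2, max p.1 p.2]) := by
  ext x
  rw [List.mem_toFinset, pv_mem_combs]
  simp only [pvNE, Finset.mem_image, Finset.mem_filter, Finset.mem_product, List.mem_toFinset]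
  constructor
  · rintro ⟨a, ha, b, hb, hne, hx⟩; exact ⟨(a, b), ⟨⟨ha, hb⟩, hne⟩, hx.symm⟩
  · rintro ⟨⟨a, b⟩, ⟨⟨ha, hb⟩, hne⟩, hx⟩; exact ⟨a, ha, b, hb, hne, hx.symm⟩

-- ===== VERDICT (by name: the statement is the Claim_ definition above) =====
theorem calculate_umaren_formation_points_spec : Claim_equal_calculate_umaren_formation_points := by
  intro line1 line2 _
  unfold Spec_calculate_umaren_formation_points
  unfold calculate_umaren_formation_points calculate_umaren_formation_points_alt
  simp only [PySem.Set.len, PySem.List.len_eq, pv_combs_eq]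
  rw [pv_len_ofList_lists, pv_len_ofList, pv_len_ofList, pv_len_inter, pv_toFinset_combs,
    pv_card_listify]
  set S1 := line1.toFinset
  set S2 := line2.toFinset
  have hmain := pv_count S1 S2
  have hii := pv_count (S1 ∩ S2) (S1 ∩ S2)
  rw [Finset.inter_self, pv_image_eq, Finset.union_self] at hii
  set cT := ((pvNE S1 S2).image pvGP).card with hcT
  set cC := (pvLT (S1 ∩ S2) (S1 ∩ S2)).card with hcC
  set i := (S1 ∩ S2).card with hi
  -- hmain : cT + cC + i = S1.card * S2.card ;  hii : cC + cC + i = i * i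
  have hprod : ((i : Int)) * ((i : Int) - 1) = 2 * (cC : Int) := by
    have h1 : ((i : Int)) * ((i : Int)) = (cC : Int) + (cC : Int) + (i : Int) := by
      exact_mod_cast hii.symm
    nlinarith [h1]
  rw [hprod, PySem.Int.floordiv_eq_ediv_of_pos (by norm_num : (0 : Int) < 2),
    Int.mul_ediv_cancel_left _ (by norm_num : (2 : Int) ≠ 0)]
  have hm : ((cT : Int)) + (cC : Int) + (i : Int) = (S1.card : Int) * (S2.card : Int) := by
    exact_mod_cast hmain
  linarith
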